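-- pv_equiv track=rewrite | github.com/Grunger/EGE | Silvertests/25/05.2022/6.py | divs
-- ===== SOURCE A (Python) =====
-- def divs(x):
--     d = set()
--     k = 2
--     while k ** 2 <= x:
--         if x % k == 0:
--             d.add(k)
--             d.add(x // k)
--         k += 1
--     return sorted(d)
--
-- k = 0
--
-- x = 850_001
-- ===== SOURCE B (Python) =====
-- def divs(x):
--     # factorize x by trial division, then generate all divisors from the
--     # prime factorization, sort, and drop 1 and x themselves
--     if x < 2:
--         return []
--     n = x
--     fac = []
--     p = 2
--     while p * p <= n:
--         if n % p == 0:
--             e = 0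
--             while n % p == 0:
--                 n //= p
--                 e += 1
--             fac.append((p, e))
--         p += 1
--     if n > 1:
--         fac.append((n, 1))
--     ds = [1]
--     for p, e in fac:
--         ds = [d * p ** i for d in ds for i in range(e + 1)]
--     ds.sort()
--     return ds[1:-1]
-- ===== Notes on version B (the rewrite author's own statement) =====
-- stated objective: alternative
-- what changed: B replaces A's sqrt(x) scan that pairs each divisor k with its cofactor x//k into a set and then sorts, by trial-division prime factorization of x followed by generating every divisor as a product of prime powers, sorting, and dropping the two trivial divisors at both ends.
import Mathlib
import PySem

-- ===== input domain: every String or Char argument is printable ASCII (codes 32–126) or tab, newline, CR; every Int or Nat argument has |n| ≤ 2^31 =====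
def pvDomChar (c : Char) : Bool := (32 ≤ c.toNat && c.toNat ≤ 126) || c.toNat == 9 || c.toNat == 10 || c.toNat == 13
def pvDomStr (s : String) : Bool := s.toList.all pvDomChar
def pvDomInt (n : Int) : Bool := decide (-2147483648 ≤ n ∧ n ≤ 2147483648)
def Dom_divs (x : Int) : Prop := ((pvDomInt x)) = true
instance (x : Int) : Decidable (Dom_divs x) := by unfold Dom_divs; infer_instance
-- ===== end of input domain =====

-- B computes the same proper divisors by a different algorithm: trial-division
-- prime factorization followed by divisor generation from the factorization.

-- termination helpers for the loops (cited by decreasing_by)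
theorem pv_le_of_sq_le (k x : Int) (h : k * k ≤ x) : k ≤ x := by
  nlinarith [sq_nonneg k, sq_nonneg (k - 1)]

theorem pv_floordiv_toNat_lt (n p : Int) (hn : 1 ≤ n) (hp : 2 ≤ p) :
    (PySem.Int.floordiv n p).toNat < n.toNat := by
  have h1 : PySem.Int.floordiv n p < n :=
    (PySem.Int.floordiv_lt_iff_lt_mul (by omega)).mpr (by nlinarith)
  have h2 : 0 ≤ PySem.Int.floordiv n p := by
    rw [PySem.Int.floordiv_eq_ediv_of_pos (by omega)]
    exact Int.ediv_nonneg (by omega) (by omega)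
  omega

-- ===== PORT A =====
def divsLoop (x k : Int) (d : PySem.Set Int) : PySem.Set Int :=
  if k ^ 2 ≤ x then
    divsLoop x (k + 1)
      (if PySem.Int.mod x k = 0
       then PySem.Set.add (PySem.Set.add d k) (PySem.Int.floordiv x k)
       else d)
  else d
termination_by (x + 1 - k).toNat
decreasing_by
  have : k ≤ x := pv_le_of_sq_le k x (by nlinarith)
  omega

def divs (x : Int) : List Int :=
  PySem.List.sorted (divsLoop x 2 PySem.Set.empty) (fun a => a) false

-- ===== PORT B =====
-- inner `while n % p == 0: n //= p; e += 1` (the 2 ≤ p ∧ 1 ≤ n conjuncts only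
-- make the recursion total; they hold whenever the Python loop runs)
def extractLoop (n p e : Int) : Int × Int :=
  if 2 ≤ p ∧ 1 ≤ n ∧ PySem.Int.mod n p = 0 then
    extractLoop (PySem.Int.floordiv n p) p (e + 1)
  else (n, e)
termination_by n.toNat
decreasing_by
  exact pv_floordiv_toNat_lt n p (by omega) (by omega)

-- termination fact for the outer loop, cited by its decreasing_by
theorem extract_fst_le (n p e : Int) : (extractLoop n p e).1 ≤ n := by
  fun_induction extractLoop n p e with
  | case1 n e h ih =>
      have h1 : PySem.Int.floordiv n p < n :=
        (PySem.Int.floordiv_lt_iff_lt_mul (by omega)).mpr (by nlinarith [h.1, h.2.1])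
      omega
  | case2 n e h => exact le_refl n

-- outer `while p * p <= n` factorization loop
def facLoop (n p : Int) (fac : List (Int × Int)) : List (Int × Int) × Int :=
  if p * p ≤ n then
    if PySem.Int.mod n p = 0 then
      facLoop (extractLoop n p 0).1 (p + 1) (fac ++ [(p, (extractLoop n p 0).2)])
    else facLoop n (p + 1) fac
  else (fac, n)
termination_by (n + 1 - p).toNat
decreasing_by
  · have h1 := extract_fst_le n p 0
    have h2 : p ≤ n := pv_le_of_sq_le p n (by assumption)
    omega
  · have h2 : p ≤ n := pv_le_of_sq_le p n (by assumption)
    omega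

-- the comprehension [d * p**i for d in ds for i in range(e+1)]
-- (p ** i ported as p ^ i.toNat — exact: i ranges over 0..e, so 0 ≤ i)
def genStep (ds : List Int) (pe : Int × Int) : List Int :=
  ds.flatMap (fun d => (PySem.List.pyRange 0 (pe.2 + 1) 1).map (fun i => d * pe.1 ^ i.toNat))

def divs_alt (x : Int) : List Int :=
  if x < 2 then []
  else
    let r := facLoop x 2 []
    let fs := if 1 < r.2 then r.1 ++ [(r.2, 1)] else r.1
    let ds := fs.foldl genStep [1]
    PySem.List.slice (PySem.List.sorted ds (fun a => a) false) (some 1) (some (-1))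

-- ===== PRECONDITION & SPEC =====
def Spec_divs (x : Int) (out : List Int) : Prop := out = divs_alt x
instance (x : Int) (out : List Int) : Decidable (Spec_divs x out) := by unfold Spec_divs; infer_instance

-- ===== CLAIM (what is proved, stated in full; the proofs are below) =====
def Claim_equal_divs : Prop := ∀ (x : Int), Dom_divs x → Spec_divs x (divs x)

-- ===== LEMMAS AND PROOFS =====
def prodFac (fs : List (Int × Int)) : Int := (fs.map (fun pe => pe.1 ^ pe.2.toNat)).prod

-- ---- the extraction loop: n = n' * p^j with p ∤ n' ----
theorem extract_spec (n p e : Int) (hn : 1 ≤ n) (hp : 2 ≤ p) :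
    ∃ j : Nat, (extractLoop n p e).1 * p ^ j = n ∧ (extractLoop n p e).2 = e + j ∧
      1 ≤ (extractLoop n p e).1 ∧ ¬ p ∣ (extractLoop n p e).1 ∧
      (p ∣ n → 1 ≤ j) := by
  fun_induction extractLoop n p e with
  | case1 n e h ih =>
      have hpn : p ∣ n := (PySem.Int.mod_eq_zero_iff_dvd n p).mp h.2.2
      have hfd : PySem.Int.floordiv n p = n / p := PySem.Int.floordiv_eq_ediv_of_pos (by omega)
      have hmul : PySem.Int.floordiv n p * p = n := by rw [hfd]; exact Int.ediv_mul_cancel hpn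
      have hpos : 1 ≤ PySem.Int.floordiv n p := by nlinarith [h.2.1, h.1]
      obtain ⟨j, hj1, hj2, hj3, hj4, hj5⟩ := ih hpos
      refine ⟨j + 1, ?_, ?_, hj3, hj4, fun _ => by omega⟩
      · rw [pow_succ, ← mul_assoc, hj1, hmul]
      · rw [hj2]; push_cast; ring
  | case2 n e h =>
      refine ⟨0, by simp, by simp, hn, ?_, ?_⟩
      · intro hpd
        exact h ⟨hp, hn, (PySem.Int.mod_eq_zero_iff_dvd n p).mpr hpd⟩
      · intro hpd
        exact absurd ⟨hp, hn, (PySem.Int.mod_eq_zero_iff_dvd n p).mpr hpd⟩ h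

-- ---- primality from absence of small divisors ----
theorem prime_of_no_lt_divisor (p : Int) (h2 : 2 ≤ p)
    (h : ∀ d : Int, 2 ≤ d → d < p → ¬ d ∣ p) : Prime p := by
  rw [Int.prime_iff_natAbs_prime, Nat.prime_def_lt']
  refine ⟨by omega, fun m hm2 hmp hdvd => ?_⟩
  refine h (m : Int) (by omega) (by omega) ?_
  have : ((m : Int)) ∣ (p.natAbs : Int) := Int.natCast_dvd_natCast.mpr hdvd
  rwa [Int.natAbs_of_nonneg (by omega : (0:Int) ≤ p)] at this

theorem prime_of_no_sqrt_divisor (n : Int) (h2 : 2 ≤ n)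
    (h : ∀ d : Int, 2 ≤ d → d * d ≤ n → ¬ d ∣ n) : Prime n := by
  rw [Int.prime_iff_natAbs_prime, Nat.prime_def_le_sqrt]
  refine ⟨by omega, fun m hm2 hms hdvd => ?_⟩
  have hmm : m * m ≤ n.natAbs := Nat.le_sqrt.mp hms
  refine h (m : Int) (by omega) (by push_cast; omega) ?_
  have : ((m : Int)) ∣ (n.natAbs : Int) := Int.natCast_dvd_natCast.mpr hdvd
  rwa [Int.natAbs_of_nonneg (by omega : (0:Int) ≤ n)] at this

-- ---- the factorization loop invariant ----
theorem fac_spec (n p : Int) (fac : List (Int × Int)) (hn : 1 ≤ n) (hp : 2 ≤ p)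
    (hnd : ∀ d : Int, 2 ≤ d → d < p → ¬ d ∣ n) :
    ∃ nf : List (Int × Int),
      (facLoop n p fac).1 = fac ++ nf ∧
      prodFac nf * (facLoop n p fac).2 = n ∧
      1 ≤ (facLoop n p fac).2 ∧
      ((facLoop n p fac).2 = 1 ∨ Prime (facLoop n p fac).2) ∧
      (∀ pe ∈ nf, Prime pe.1 ∧ 2 ≤ pe.1 ∧ 1 ≤ pe.2 ∧ p ≤ pe.1 ∧ ¬ pe.1 ∣ (facLoop n p fac).2) ∧
      nf.Pairwise (fun a b => a.1 < b.1) ∧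
      (facLoop n p fac).2 ∣ n := by
  fun_induction facLoop n p fac with
  | case1 n p fac hg hm ih =>
      obtain ⟨j, hj1, hj2, hj3, hj4, hj5⟩ := extract_spec n p 0 hn hp
      have hpdvd : p ∣ n := (PySem.Int.mod_eq_zero_iff_dvd n p).mp hm
      have hjj : 1 ≤ j := hj5 hpdvd
      have hn1dvd : (extractLoop n p 0).1 ∣ n := ⟨p ^ j, hj1.symm⟩
      have hprime : Prime p :=
        prime_of_no_lt_divisor p hp (fun d h1 h2 hdp => hnd d h1 h2 (hdp.trans hpdvd))
      have hnd1 : ∀ d : Int, 2 ≤ d → d < p + 1 → ¬ d ∣ (extractLoop n p 0).1 := by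
        intro d h1 h2 hdn1
        rcases lt_or_eq_of_le (by omega : d ≤ p) with hlt | rfl
        · exact hnd d h1 hlt (hdn1.trans hn1dvd)
        · exact hj4 hdn1
      obtain ⟨nf', k1, k2, k3, k4, k5, k6, k7⟩ := ih hj3 (by omega) hnd1
      have he : (extractLoop n p 0).2 = (j : Int) := by rw [hj2]; ring
      have het : (extractLoop n p 0).2.toNat = j := by omega
      refine ⟨(p, (extractLoop n p 0).2) :: nf', ?_, ?_, k3, k4, ?_, ?_, k7.trans hn1dvd⟩
      · rw [k1]; simp
      · simp only [prodFac, List.map_cons, List.prod_cons] at k2 ⊢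
        rw [het, mul_assoc, k2, mul_comm, hj1]
      · intro pe hpe'
        rcases List.mem_cons.mp hpe' with rfl | hpe
        · refine ⟨hprime, hp, by omega, le_refl _, fun hc => hj4 (hc.trans k7)⟩
        · obtain ⟨a1, a2, a3, a4, a5⟩ := k5 pe hpe
          exact ⟨a1, a2, a3, by omega, a5⟩
      · refine List.pairwise_cons.mpr ⟨?_, k6⟩
        intro pe hpe
        have := (k5 pe hpe).2.2.2.1
        omega
  | case2 n p fac hg hm ih =>
      have hnd1 : ∀ d : Int, 2 ≤ d → d < p + 1 → ¬ d ∣ n := by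
        intro d h1 h2 hdn
        rcases lt_or_eq_of_le (by omega : d ≤ p) with hlt | rfl
        · exact hnd d h1 hlt hdn
        · exact hm ((PySem.Int.mod_eq_zero_iff_dvd n d).mpr hdn)
      obtain ⟨nf', k1, k2, k3, k4, k5, k6, k7⟩ := ih hn (by omega) hnd1
      refine ⟨nf', k1, k2, k3, k4, ?_, k6, k7⟩
      intro pe hpe
      obtain ⟨a1, a2, a3, a4, a5⟩ := k5 pe hpe
      exact ⟨a1, a2, a3, by omega, a5⟩
  | case3 n p fac hg =>
      refine ⟨[], by simp, by simp [prodFac], hn, ?_, by simp, List.Pairwise.nil, dvd_refl n⟩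
      rcases eq_or_lt_of_le hn with h1 | h2
      · exact Or.inl h1.symm
      · refine Or.inr (prime_of_no_sqrt_divisor n (by omega) ?_)
        intro d hd1 hd2 hdn
        have hdp : d < p := by nlinarith
        exact hnd d hd1 hdp hdn

-- ---- positive divisors of a prime power ----
theorem int_pos_dvd_prime_pow (p : Int) (hp : Prime p) (h2 : 2 ≤ p) (et : Nat)
    (b : Int) (hb : 0 < b) (hd : b ∣ p ^ et) : ∃ i, i ≤ et ∧ b = p ^ i := by
  have hpn : p.natAbs.Prime := Int.prime_iff_natAbs_prime.mp hp
  have hdn : b.natAbs ∣ p.natAbs ^ et := by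
    rw [← Int.natAbs_pow]; exact Int.natAbs_dvd_natAbs.mpr hd
  obtain ⟨i, hi, hbe⟩ := (Nat.dvd_prime_pow hpn).mp hdn
  refine ⟨i, hi, ?_⟩
  have hb' : ((b.natAbs : ℕ) : Int) = b := Int.natAbs_of_nonneg hb.le
  rw [← hb', hbe, Nat.cast_pow, Int.natAbs_of_nonneg (by omega : (0:Int) ≤ p)]

theorem pv_pow_inj (p : Int) (h2 : 2 ≤ p) {a b : Nat} (h : p ^ a = p ^ b) : a = b := by
  rcases lt_trichotomy a b with hl | he | hl
  · have := pow_lt_pow_right₀ (by omega : (1:Int) < p) hl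
    rw [h] at this; exact absurd this (lt_irrefl _)
  · exact he
  · have := pow_lt_pow_right₀ (by omega : (1:Int) < p) hl
    rw [h] at this; exact absurd this (lt_irrefl _)

-- ---- divisors of K * p^et are uniquely d * p^i ----
theorem crux_mem (p : Int) (hp : Prime p) (h2 : 2 ≤ p) (et : Nat) (K a : Int)
    (hK : 1 ≤ K) (hpK : ¬ p ∣ K) :
    (∃ d, (0 < d ∧ d ∣ K) ∧ ∃ j, j ≤ et ∧ a = d * p ^ j) ↔ (0 < a ∧ a ∣ K * p ^ et) := by
  constructor
  · rintro ⟨d, ⟨hd0, hdK⟩, j, hj, rfl⟩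
    exact ⟨mul_pos hd0 (pow_pos (by omega) j), mul_dvd_mul hdK (pow_dvd_pow p hj)⟩
  · rintro ⟨ha, hdvd⟩
    obtain ⟨d1, d2, hd1, hd2, heq⟩ := exists_dvd_and_dvd_of_dvd_mul hdvd
    have hd1ne : d1 ≠ 0 := by rintro rfl; rw [zero_mul] at heq; omega
    have hd2ne : d2 ≠ 0 := by rintro rfl; rw [mul_zero] at heq; omega
    have h2d : ((d2.natAbs : ℕ) : Int) ∣ p ^ et := by rw [Int.natAbs_dvd]; exact hd2
    obtain ⟨i, hi, hpi⟩ := int_pos_dvd_prime_pow p hp h2 et _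
      (by exact_mod_cast Int.natAbs_pos.mpr hd2ne) h2d
    refine ⟨(d1.natAbs : Int),
      ⟨by exact_mod_cast Int.natAbs_pos.mpr hd1ne, by rw [Int.natAbs_dvd]; exact hd1⟩,
      i, hi, ?_⟩
    rw [← hpi]
    calc a = ((a.natAbs : ℕ) : Int) := (Int.natAbs_of_nonneg ha.le).symm
    _ = (((d1 * d2).natAbs : ℕ) : Int) := by rw [heq]
    _ = (d1.natAbs : Int) * (d2.natAbs : Int) := by rw [Int.natAbs_mul]; push_cast; ring

theorem crux_unique_aux (p : Int) (h2 : 2 ≤ p) (K d d' : Int) (hd : 0 < d)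
    (hdK : d ∣ K) (hpK : ¬ p ∣ K) (i j : Nat) (hij : i ≤ j)
    (h : d * p ^ i = d' * p ^ j) : d = d' ∧ i = j := by
  have hpne : (p : Int) ^ i ≠ 0 := pow_ne_zero _ (by omega)
  have hdd : d = d' * p ^ (j - i) := by
    have hexp : p ^ j = p ^ (j - i) * p ^ i := by rw [← pow_add]; congr 1; omega
    have h' := h
    rw [hexp, ← mul_assoc] at h'
    exact mul_right_cancel₀ hpne h'
  rcases Nat.eq_or_lt_of_le hij with rfl | hlt
  · refine ⟨mul_right_cancel₀ hpne h, rfl⟩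
  · exfalso
    have hpd : p ∣ d := hdd ▸ Dvd.dvd.mul_left (dvd_pow_self p (by omega : j - i ≠ 0)) d'
    exact hpK (hpd.trans hdK)

theorem crux_unique (p : Int) (h2 : 2 ≤ p) (K d d' : Int) (hd : 0 < d) (hd' : 0 < d')
    (hdK : d ∣ K) (hd'K : d' ∣ K) (hpK : ¬ p ∣ K) (i j : Nat)
    (h : d * p ^ i = d' * p ^ j) : d = d' ∧ i = j := by
  rcases le_total i j with hij | hij
  · exact crux_unique_aux p h2 K d d' hd hdK hpK i j hij h
  · obtain ⟨h1, h2'⟩ := crux_unique_aux p h2 K d' d hd' hd'K hpK j i hij h.symm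
    exact ⟨h1.symm, h2'.symm⟩

-- ---- membership and nodup of one generation step ----
theorem genStep_mem (ds : List Int) (p e a : Int) (he : 1 ≤ e) :
    a ∈ genStep ds (p, e) ↔ ∃ d ∈ ds, ∃ j : Nat, j ≤ e.toNat ∧ a = d * p ^ j := by
  simp only [genStep, List.mem_flatMap, List.mem_map]
  constructor
  · rintro ⟨d, hd, i, hi, rfl⟩
    rw [PySem.List.mem_pyRange_one] at hi
    exact ⟨d, hd, i.toNat, by omega, rfl⟩
  · rintro ⟨d, hd, j, hj, rfl⟩
    refine ⟨d, hd, (j : Int), ?_, ?_⟩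
    · rw [PySem.List.mem_pyRange_one]; omega
    · rw [Int.toNat_natCast]

theorem genStep_nodup (p e K : Int) (h2 : 2 ≤ p) (he : 1 ≤ e) (hpK : ¬ p ∣ K) (ds : List Int)
    (hds : ∀ d ∈ ds, 0 < d ∧ d ∣ K) (hnd : ds.Nodup) : (genStep ds (p, e)).Nodup := by
  induction ds with
  | nil => simp [genStep]
  | cons d ds ih =>
      obtain ⟨hd0, hdK⟩ := hds d List.mem_cons_self
      rw [List.nodup_cons] at hnd
      have hblock : ((PySem.List.pyRange 0 (e + 1) 1).map (fun i => d * p ^ i.toNat)).Nodup := by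
        refine List.Nodup.map_on ?_ (PySem.List.nodup_pyRange_one 0 (e + 1))
        intro i hi i' hi' hEq
        rw [PySem.List.mem_pyRange_one] at hi hi'
        have h1 : p ^ i.toNat = p ^ i'.toNat := mul_left_cancel₀ (by omega) hEq
        have h2 : i.toNat = i'.toNat := pv_pow_inj p h2 h1
        omega
      have hrest : (genStep ds (p, e)).Nodup := ih (fun d' hd' => hds d' (List.mem_cons_of_mem _ hd')) hnd.2
      rw [show genStep (d :: ds) (p, e) =
        ((PySem.List.pyRange 0 (e + 1) 1).map (fun i => d * p ^ i.toNat)) ++ genStep ds (p, e) from rfl]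
      rw [List.nodup_append]
      refine ⟨hblock, hrest, ?_⟩
      intro a ha b hb
      simp only [List.mem_map] at ha
      obtain ⟨i, hi, rfl⟩ := ha
      rw [genStep_mem ds p e _ he] at hb
      obtain ⟨d', hd', j', hj', rfl⟩ := hb
      obtain ⟨hd'0, hd'K⟩ := hds d' (List.mem_cons_of_mem _ hd')
      intro hEq
      obtain ⟨hdd, _⟩ := crux_unique p h2 K d d' hd0 hd'0 hdK hd'K hpK i.toNat j' hEq
      exact hnd.1 (hdd ▸ hd')

-- ---- the generation fold ----
theorem gen_spec (fs : List (Int × Int)) (K : Int) (ds : List Int)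
    (hK : 1 ≤ K)
    (hfs : ∀ pe ∈ fs, Prime pe.1 ∧ 2 ≤ pe.1 ∧ 1 ≤ pe.2)
    (hpair : fs.Pairwise (fun a b => a.1 ≠ b.1))
    (hcop : ∀ pe ∈ fs, ¬ pe.1 ∣ K)
    (hmem : ∀ a, a ∈ ds ↔ 0 < a ∧ a ∣ K)
    (hnd : ds.Nodup) :
    (∀ a, a ∈ fs.foldl genStep ds ↔ 0 < a ∧ a ∣ K * prodFac fs) ∧
      (fs.foldl genStep ds).Nodup := by
  induction fs generalizing K ds with
  | nil =>
      simp only [List.foldl_nil, prodFac, List.map_nil, List.prod_nil, mul_one]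
      exact ⟨hmem, hnd⟩
  | cons pe rest ih =>
      obtain ⟨p, e⟩ := pe
      obtain ⟨hp, hp2, he⟩ := hfs (p, e) List.mem_cons_self
      have hpK : ¬ p ∣ K := hcop (p, e) List.mem_cons_self
      have hppow : (1 : Int) ≤ p ^ e.toNat := one_le_pow₀ (by omega)
      have hK' : 1 ≤ K * p ^ e.toNat := by nlinarith
      have hmem' : ∀ a, a ∈ genStep ds (p, e) ↔ 0 < a ∧ a ∣ K * p ^ e.toNat := by
        intro a
        rw [genStep_mem ds p e a he, ← crux_mem p hp hp2 e.toNat K a hK hpK]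
        constructor
        · rintro ⟨d, hd, j, hj, rfl⟩
          exact ⟨d, (hmem d).mp hd, j, hj, rfl⟩
        · rintro ⟨d, hd, j, hj, rfl⟩
          exact ⟨d, (hmem d).mpr hd, j, hj, rfl⟩
      have hnd' : (genStep ds (p, e)).Nodup :=
        genStep_nodup p e K hp2 he hpK ds (fun d hd => (hmem d).mp hd) hnd
      have hpairrest := (List.pairwise_cons.mp hpair).2
      have hcop' : ∀ q ∈ rest, ¬ q.1 ∣ K * p ^ e.toNat := by
        intro q hq hdv
        obtain ⟨hqp, hq2, _⟩ := hfs q (List.mem_cons_of_mem _ hq)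
        rcases hqp.dvd_mul.mp hdv with hc | hc
        · exact hcop q (List.mem_cons_of_mem _ hq) hc
        · have hqdp : q.1 ∣ p := hqp.dvd_of_dvd_pow hc
          have h1 : q.1.natAbs ∣ p.natAbs := Int.natAbs_dvd_natAbs.mpr hqdp
          have h2 : q.1.natAbs = p.natAbs :=
            (Nat.prime_dvd_prime_iff_eq (Int.prime_iff_natAbs_prime.mp hqp)
              (Int.prime_iff_natAbs_prime.mp hp)).mp h1
          have : p ≠ q.1 := (List.pairwise_cons.mp hpair).1 q hq
          omega
      obtain ⟨hm, hn⟩ := ih (K * p ^ e.toNat) (genStep ds (p, e)) hK'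
        (fun q hq => hfs q (List.mem_cons_of_mem _ hq)) hpairrest hcop' hmem' hnd'
      rw [List.foldl_cons]
      refine ⟨fun a => ?_, hn⟩
      rw [hm a]
      have : K * p ^ e.toNat * prodFac rest = K * prodFac ((p, e) :: rest) := by
        simp only [prodFac, List.map_cons, List.prod_cons]; ring
      rw [this]

-- ---- A-side membership (number theory for the divisor pairing) ----
theorem mem_divsLoop (x k a : Int) (d : PySem.Set Int) (hk : 0 ≤ k) :
    a ∈ divsLoop x k d ↔
      a ∈ d ∨ ∃ j, k ≤ j ∧ j * j ≤ x ∧ PySem.Int.mod x j = 0 ∧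
        (a = j ∨ a = PySem.Int.floordiv x j) := by
  fun_induction divsLoop x k d with
  | case1 k d hg ih =>
      simp only [dite_eq_ite] at ih
      rw [ih (by omega)]
      rw [pow_two] at hg
      by_cases hm : PySem.Int.mod x k = 0
      · rw [if_pos hm]
        simp only [PySem.Set.mem_add]
        constructor
        · rintro (((h | rfl) | rfl) | ⟨j, h1, h2, h3, h4⟩)
          · exact Or.inl h
          · exact Or.inr ⟨a, le_refl _, hg, hm, Or.inl rfl⟩
          · exact Or.inr ⟨k, le_refl _, hg, hm, Or.inr rfl⟩
          · exact Or.inr ⟨j, by omega, h2, h3, h4⟩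
        · rintro (h | ⟨j, h1, h2, h3, h4⟩)
          · exact Or.inl (Or.inl (Or.inl h))
          · rcases eq_or_lt_of_le h1 with rfl | h
            · rcases h4 with rfl | rfl
              · exact Or.inl (Or.inl (Or.inr rfl))
              · exact Or.inl (Or.inr rfl)
            · exact Or.inr ⟨j, by omega, h2, h3, h4⟩
      · simp only [if_neg hm]
        constructor
        · rintro (h | ⟨j, h1, h2, h3, h4⟩)
          · exact Or.inl h
          · exact Or.inr ⟨j, by omega, h2, h3, h4⟩
        · rintro (h | ⟨j, h1, h2, h3, h4⟩)
          · exact Or.inl h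
          · rcases eq_or_lt_of_le h1 with rfl | h
            · exact absurd h3 hm
            · exact Or.inr ⟨j, by omega, h2, h3, h4⟩
  | case2 k d hg =>
      rw [pow_two] at hg
      simp only [iff_self_or]
      rintro ⟨j, h1, h2, h3, h4⟩
      have : k * k ≤ j * j := mul_le_mul h1 h1 hk (by omega)
      omega

theorem nodup_divsLoop (x k : Int) (d : PySem.Set Int) (hd : d.Nodup) :
    (divsLoop x k d).Nodup := by
  fun_induction divsLoop x k d with
  | case1 k d hg ih =>
      apply ih
      split
      · exact PySem.Set.nodup_add _ _ (PySem.Set.nodup_add _ _ hd)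
      · exact hd
  | case2 k d hg => exact hd

theorem nt_small {x a : Int} (h2 : 2 ≤ a) (hs : a * a ≤ x) (hm : PySem.Int.mod x a = 0) :
    2 ≤ a ∧ a < x ∧ PySem.Int.mod x a = 0 :=
  ⟨h2, by nlinarith, hm⟩

theorem nt_big {x j : Int} (h2 : 2 ≤ j) (hs : j * j ≤ x) (hm : PySem.Int.mod x j = 0) :
    2 ≤ PySem.Int.floordiv x j ∧ PySem.Int.floordiv x j < x ∧
    PySem.Int.mod x (PySem.Int.floordiv x j) = 0 := by
  have hj0 : (0 : Int) < j := by omega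
  have hd : j ∣ x := (PySem.Int.mod_eq_zero_iff_dvd x j).mp hm
  rw [PySem.Int.floordiv_eq_ediv_of_pos hj0]
  set a := x / j with ha
  have amul : a * j = x := Int.ediv_mul_cancel hd
  have hx0 : 0 < x := by nlinarith
  have ha0 : 0 < a := by nlinarith
  have hja : j ≤ a := by nlinarith
  exact ⟨by nlinarith, by nlinarith,
    (PySem.Int.mod_eq_zero_iff_dvd x a).mpr ⟨j, amul.symm⟩⟩

theorem nt_rev {x a : Int} (h2 : 2 ≤ a) (hx : a < x) (hm : PySem.Int.mod x a = 0)
    (hbig : ¬ a * a ≤ x) :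
    ∃ j, 2 ≤ j ∧ j * j ≤ x ∧ PySem.Int.mod x j = 0 ∧ a = PySem.Int.floordiv x j := by
  have ha0 : (0 : Int) < a := by omega
  have hd : a ∣ x := (PySem.Int.mod_eq_zero_iff_dvd x a).mp hm
  refine ⟨x / a, ?_⟩
  set j := x / a with hj
  have jmul : j * a = x := Int.ediv_mul_cancel hd
  have hx0 : 0 < x := by omega
  have hj0 : 0 < j := by nlinarith
  have hj1 : j ≠ 1 := fun h => by rw [h, one_mul] at jmul; omega
  have h2j : 2 ≤ j := by omega
  have hja : j < a := by nlinarith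
  have hjj : j * j ≤ x := by nlinarith
  have hmj : PySem.Int.mod x j = 0 :=
    (PySem.Int.mod_eq_zero_iff_dvd x j).mpr ⟨a, jmul.symm⟩
  refine ⟨h2j, hjj, hmj, ?_⟩
  rw [PySem.Int.floordiv_eq_ediv_of_pos hj0, ← jmul, mul_comm,
    Int.mul_ediv_cancel a (by omega)]

theorem memA (x a : Int) :
    a ∈ divsLoop x 2 PySem.Set.empty ↔ 2 ≤ a ∧ a < x ∧ PySem.Int.mod x a = 0 := by
  rw [mem_divsLoop x 2 a _ (by omega)]
  simp only [PySem.Set.empty, List.not_mem_nil, false_or]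
  constructor
  · rintro ⟨j, h1, h2, h3, rfl | rfl⟩
    · exact nt_small h1 h2 h3
    · exact nt_big h1 h2 h3
  · rintro ⟨h1, h2, h3⟩
    by_cases hs : a * a ≤ x
    · exact ⟨a, h1, hs, h3, Or.inl rfl⟩
    · obtain ⟨j, j1, j2, j3, j4⟩ := nt_rev h1 h2 h3 hs
      exact ⟨j, j1, j2, j3, Or.inr j4⟩

-- ---- the slice [1:-1] of a list of shape a :: t ++ [b] ----
theorem slice_one_neg_one (a b : Int) (t : List Int) :
    PySem.List.slice (a :: (t ++ [b])) (some 1) (some (-1)) = t := by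
  simp [PySem.List.slice]

-- ---- final assembly ----
theorem divs_eq_alt (x : Int) : divs x = divs_alt x := by
  by_cases hx : x < 2
  · have hA : divsLoop x 2 PySem.Set.empty = PySem.Set.empty := by
      rw [divsLoop, if_neg]
      intro hc; norm_num at hc; omega
    rw [divs, hA, divs_alt, if_pos hx]
    rfl
  · push_neg at hx
    obtain ⟨nf, k1, k2, k3, k4, k5, k6, k7⟩ :=
      fac_spec x 2 [] (by omega) (le_refl 2) (by intro d h1 h2 _; omega)
    rw [List.nil_append] at k1
    set r := facLoop x 2 [] with hrdef
    set fs := (if 1 < r.2 then r.1 ++ [(r.2, 1)] else r.1) with hfsdef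
    have hGf : ∀ pe ∈ fs, Prime pe.1 ∧ 2 ≤ pe.1 ∧ 1 ≤ pe.2 := by
      intro pe hpe
      rw [hfsdef] at hpe
      by_cases h2 : 1 < r.2
      · rw [if_pos h2] at hpe
        rcases List.mem_append.mp hpe with h | h
        · have := k5 pe (k1 ▸ h)
          exact ⟨this.1, this.2.1, this.2.2.1⟩
        · rcases List.mem_singleton.mp h with rfl
          rcases k4 with h4 | h4
          · omega
          · exact ⟨h4, by omega, by norm_num⟩
      · rw [if_neg h2] at hpe
        have := k5 pe (k1 ▸ hpe)
        exact ⟨this.1, this.2.1, this.2.2.1⟩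
    have hGp : fs.Pairwise (fun a b => a.1 ≠ b.1) := by
      have hnfpair : nf.Pairwise (fun a b => a.1 ≠ b.1) := k6.imp (fun h => ne_of_lt h)
      rw [hfsdef]
      by_cases h2 : 1 < r.2
      · rw [if_pos h2, k1]
        refine List.pairwise_append.mpr ⟨hnfpair, List.pairwise_singleton _ _, ?_⟩
        intro a ha b hb
        rw [List.mem_singleton] at hb; subst hb
        intro hEq
        exact (k5 a ha).2.2.2.2 (hEq ▸ dvd_refl a.1)
      · rw [if_neg h2, k1]; exact hnfpair
    have hprod : prodFac fs = x := by
      rw [hfsdef]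
      by_cases h2 : 1 < r.2
      · rw [if_pos h2, k1]
        have hap : prodFac (nf ++ [(r.2, 1)]) = prodFac nf * r.2 := by
          simp [prodFac]
        rw [hap]; exact k2
      · rw [if_neg h2, k1]
        have hr1 : r.2 = 1 := by omega
        rw [← k2, hr1, mul_one]
    have hcop1 : ∀ pe ∈ fs, ¬ pe.1 ∣ (1 : Int) := by
      intro pe hpe hdv
      have h1 := hGf pe hpe
      have h2 := Int.le_of_dvd one_pos hdv
      omega
    have hmem1 : ∀ a : Int, a ∈ ([1] : List Int) ↔ 0 < a ∧ a ∣ 1 := by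
      intro a
      simp only [List.mem_singleton]
      constructor
      · rintro rfl; exact ⟨one_pos, dvd_refl 1⟩
      · rintro ⟨h1, h2⟩; exact Int.eq_one_of_dvd_one h1.le h2
    obtain ⟨hm, hnd⟩ := gen_spec fs 1 [1] (le_refl 1) hGf hGp hcop1 hmem1 (List.nodup_singleton 1)
    have hmem_ds : ∀ a, a ∈ fs.foldl genStep [1] ↔ 0 < a ∧ a ∣ x := by
      intro a; rw [hm a, one_mul, hprod]
    have hndM : (divs x).Nodup := by
      rw [divs]
      exact ((PySem.List.sorted_perm _ _ _).symm).nodup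
        (nodup_divsLoop x 2 _ (by simp [PySem.Set.empty]))
    have hmemM : ∀ a, a ∈ divs x ↔ 2 ≤ a ∧ a < x ∧ PySem.Int.mod x a = 0 := by
      intro a; rw [divs, PySem.List.mem_sorted]; exact memA x a
    have hpM : (divs x).Pairwise (· < ·) := by
      have h1 : (divs x).Pairwise (fun a b => a ≤ b) := PySem.List.sorted_pairwise _ _
      have h2 : (divs x).Pairwise (fun a b => a ≠ b) := hndM
      exact (h1.and h2).imp (fun h => lt_of_le_of_ne h.1 h.2)
    set C := (1 : Int) :: (divs x ++ [x]) with hC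
    have hCp : C.Pairwise (· < ·) := by
      rw [hC]
      refine List.pairwise_cons.mpr ⟨?_, ?_⟩
      · intro b hb
        rcases List.mem_append.mp hb with h | h
        · have := (hmemM b).mp h; omega
        · rw [List.mem_singleton] at h; omega
      · refine List.pairwise_append.mpr ⟨hpM, List.pairwise_singleton _ _, ?_⟩
        intro a ha b hb
        rw [List.mem_singleton] at hb; subst hb
        exact ((hmemM a).mp ha).2.1
    have hCnd : C.Nodup := hCp.imp (fun h => ne_of_lt h)
    have hperm : C.Perm (fs.foldl genStep [1]) := by
      rw [List.perm_ext_iff_of_nodup hCnd hnd]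
      intro a
      rw [hmem_ds a, hC]
      simp only [List.mem_cons, List.mem_append, List.not_mem_nil, or_false]
      constructor
      · rintro (rfl | h | rfl)
        · exact ⟨one_pos, one_dvd x⟩
        · have := (hmemM a).mp h
          exact ⟨by omega, (PySem.Int.mod_eq_zero_iff_dvd x a).mp this.2.2⟩
        · exact ⟨by omega, dvd_refl _⟩
      · rintro ⟨h1, h2⟩
        have hax : a ≤ x := Int.le_of_dvd (by omega) h2
        by_cases ha1 : a = 1
        · exact Or.inl ha1
        by_cases hax' : a = x
        · exact Or.inr (Or.inr hax')
        · exact Or.inr (Or.inl ((hmemM a).mpr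
            ⟨by omega, by omega, (PySem.Int.mod_eq_zero_iff_dvd x a).mpr h2⟩))
    have hsort : PySem.List.sorted (fs.foldl genStep [1]) (fun a => a) false = C :=
      PySem.List.sorted_eq_of_perm_of_pairwise_lt _ _ _ hperm hCp
    have halt : divs_alt x = PySem.List.slice
        (PySem.List.sorted (fs.foldl genStep [1]) (fun a => a) false) (some 1) (some (-1)) := by
      rw [divs_alt, if_neg (by omega)]
    rw [halt, hsort, hC]
    exact (slice_one_neg_one 1 x (divs x)).symm

-- ===== VERDICT (by name: the statement is the Claim_ definition above) =====
theorem divs_spec : Claim_equal_divs := by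
  intro x _
  exact divs_eq_alt x
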